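-- pv_equiv track=rewrite | github.com/mclaramarinho/fds-control-bot-py | utils/formatter.py | text_formatter
-- ===== SOURCE A (Python) =====
-- FORMATTER = {
--     "italic": "_",
--     "bold": "*",
--     "strike": "~",
--     "mono": "`",
--     "spoiler": "||",
--     "lineBreak": "\n"
-- }
--
-- def text_formatter(text):
--     all_special_chars = ["\\", '+', '-', "'", '"', "^", ".", ",", "!", "*", "_", "~", "`", "/", ";", "?", "<", ">", "]", "[", ":", "@", "#", "$", "%", "&", "(", ")"]
--     try:
--         for sc in all_special_chars:
--             text = text.replace(sc, f'\\{sc}')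
--
--         for f in FORMATTER:
--             current_format = '{' + f + '}'
--
--             if current_format in text:
--                 text = text.replace(current_format, FORMATTER[f])
--
--         text = text.replace('{', '\\{')
--         text = text.replace('}', '\\}')
--
--         return text
--     except Exception:
--         return text
-- ===== SOURCE B (Python) =====
-- FORMATTER = {
--     "italic": "_",
--     "bold": "*",
--     "strike": "~",
--     "mono": "`",
--     "spoiler": "||",
--     "lineBreak": "\n"
-- }
--
-- _SPECIALS = "\\+-'\"^.,!*_~`/;?<>][:@#$%&()"
-- _ESC = {c: '\\' + c for c in _SPECIALS}
-- _TOKENS = [('{' + k + '}', v) for k, v in FORMATTER.items()]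
--
--
-- def text_formatter(text):
--     try:
--         # pass 1: escape special characters, one char at a time
--         s = ''.join(_ESC.get(c, c) for c in text)
--         # pass 2: single left-to-right scan replacing format tokens and
--         # escaping any brace that does not start a token
--         out = []
--         i = 0
--         n = len(s)
--         while i < n:
--             for tok, rep in _TOKENS:
--                 if s.startswith(tok, i):
--                     out.append(rep)
--                     i += len(tok)
--                     break
--             else:
--                 c = s[i]
--                 out.append('\\' + c if c in '{}' else c)
--                 i += 1
--         return ''.join(out)
--     except Exception:
--         return text
-- ===== Notes on version B (the rewrite author's own statement) =====
-- stated objective: alternative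
-- what changed: A makes 36 sequential whole-string .replace passes (28 escapes, 6 guarded token substitutions, 2 brace escapes); B builds an escape table and emits the result in a single per-character escape pass followed by one left-to-right scan that substitutes the first matching format token or escapes a stray brace at each position.
import Mathlib
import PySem

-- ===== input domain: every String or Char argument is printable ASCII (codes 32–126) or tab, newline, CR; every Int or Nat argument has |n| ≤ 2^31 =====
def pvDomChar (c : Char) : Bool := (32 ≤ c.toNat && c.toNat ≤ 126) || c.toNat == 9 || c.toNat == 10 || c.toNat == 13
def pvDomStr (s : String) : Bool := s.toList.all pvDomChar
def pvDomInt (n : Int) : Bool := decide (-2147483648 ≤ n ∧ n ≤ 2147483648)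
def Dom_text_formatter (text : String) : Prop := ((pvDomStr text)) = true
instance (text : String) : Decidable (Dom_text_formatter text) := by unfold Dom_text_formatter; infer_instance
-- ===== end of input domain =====

-- B replaces A's 36 sequential whole-string .replace passes by one per-character escape
-- pass plus one left-to-right scanner pass (objective: alternative single-pass algorithm).

-- ===== PORT A =====
def pvSpecialChars : List Char :=
  ['\\', '+', '-', '\'', '"', '^', '.', ',', '!', '*', '_', '~', '`', '/', ';', '?',
   '<', '>', ']', '[', ':', '@', '#', '$', '%', '&', '(', ')']

-- the FORMATTER dict (keys in insertion order)
def pvFormatter : List (List Char × List Char) :=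
  [("italic".toList, ['_']), ("bold".toList, ['*']), ("strike".toList, ['~']),
   ("mono".toList, ['`']), ("spoiler".toList, ['|', '|']), ("lineBreak".toList, ['\n'])]

def text_formatter (text : String) : String :=
  let t1 := pvSpecialChars.foldl (fun t sc => PySem.Chars.replace t [sc] ('\\' :: [sc])) text.toList
  let t2 := pvFormatter.foldl (fun t f =>
      let cf := '{' :: f.1 ++ ['}']
      if PySem.Chars.isIn cf t then PySem.Chars.replace t cf f.2 else t) t1
  let t3 := PySem.Chars.replace t2 ['{'] ['\\', '{']
  let t4 := PySem.Chars.replace t3 ['}'] ['\\', '}']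
  String.ofList t4

-- ===== PORT B =====
def pvSpecialsB : List Char := "\\+-'\"^.,!*_~`/;?<>][:@#$%&()".toList

def pvEsc (c : Char) : List Char := if c ∈ pvSpecialsB then ['\\', c] else [c]

def pvTokens : List (List Char × List Char) :=
  [(['{','i','t','a','l','i','c','}'], ['_']), (['{','b','o','l','d','}'], ['*']),
   (['{','s','t','r','i','k','e','}'], ['~']), (['{','m','o','n','o','}'], ['`']),
   (['{','s','p','o','i','l','e','r','}'], ['|','|']), (['{','l','i','n','e','B','r','e','a','k','}'], ['\n'])]

-- the single while-loop scan of Source B: first matching token, else escape a brace, else copy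
def pvScan (l : List Char) : List Char :=
  match l with
  | [] => []
  | c :: t =>
    match pvTokens.find? (fun tr => tr.1.isPrefixOf (c :: t)) with
    | some tr => tr.2 ++ pvScan (List.drop (tr.1.length - 1) t)
    | none => (if c = '{' ∨ c = '}' then ['\\', c] else [c]) ++ pvScan t
termination_by l.length
decreasing_by
  · simp only [List.length_drop, List.length_cons]; omega
  · simp

def text_formatter_alt (text : String) : String :=
  String.ofList (pvScan (text.toList.flatMap pvEsc))

-- ===== PRECONDITION & SPEC =====
def Spec_text_formatter (text : String) (out : String) : Prop := out = text_formatter_alt text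
instance (text : String) (out : String) : Decidable (Spec_text_formatter text out) := by unfold Spec_text_formatter; infer_instance

-- ===== CLAIM (what is proved, stated in full; the proofs are below) =====
def Claim_equal_text_formatter : Prop := ∀ (text : String), Dom_text_formatter text → Spec_text_formatter text (text_formatter text)

-- ===== LEMMAS AND PROOFS =====

-- a clean structural recursion equal to PySem.Chars.replace (for a nonempty pattern)
def pvRep (old new : List Char) : List Char → List Char
  | [] => []
  | c :: t =>
    if old.isPrefixOf (c :: t) then new ++ pvRep old new (List.drop (old.length - 1) t)
    else c :: pvRep old new t
termination_by l => l.length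
decreasing_by
  · simp only [List.length_drop, List.length_cons]; omega
  · simp

theorem pvRep_go (old new : List Char) (h : old ≠ []) :
    ∀ (fuel : Nat) (l acc : List Char), l.length ≤ fuel →
      PySem.Chars.replace.go old new fuel l acc = acc.reverse ++ pvRep old new l := by
  intro fuel
  induction fuel with
  | zero =>
    intro l acc hl
    have : l = [] := by cases l <;> simp_all
    subst this
    simp [PySem.Chars.replace.go, pvRep]
  | succ n ih =>
    intro l acc hl
    cases l with
    | nil => simp [PySem.Chars.replace.go, pvRep]
    | cons c t =>
      rw [PySem.Chars.replace.go]
      split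
      · rename_i hpre
        obtain ⟨o, os, rfl⟩ : ∃ o os, old = o :: os := by
          cases old with | nil => exact absurd rfl h | cons o os => exact ⟨o, os, rfl⟩
        rw [ih _ _ (by simp at hl ⊢; omega)]
        rw [pvRep, if_pos hpre]
        simp [List.drop_succ_cons]
      · rename_i hpre
        rw [ih _ _ (by simp at hl ⊢; omega)]
        rw [pvRep, if_neg hpre]
        simp

theorem replace_eq_pvRep (s old new : List Char) (h : old ≠ []) :
    PySem.Chars.replace s old new = pvRep old new s := by
  rw [PySem.Chars.replace, if_neg (by simp [h]), pvRep_go old new h s.length s [] le_rfl]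
  simp

-- single-character replacement is a flatMap
theorem pvRep_single (a : Char) (r : List Char) (l : List Char) :
    pvRep [a] r l = l.flatMap (fun x => if x = a then r else [x]) := by
  induction l with
  | nil => simp [pvRep]
  | cons c t ih =>
    rw [pvRep]
    by_cases hca : a = c
    · subst hca; rw [if_pos (by simp [List.isPrefixOf])]; simp [ih]
    · have hca' : c ≠ a := fun he => hca he.symm
      rw [if_neg (by simp [List.isPrefixOf]; exact hca)]
      simp [ih, hca']

-- replacement of an absent pattern is the identity
theorem pvRep_of_not_infix (p r l : List Char) (h : ¬ p <:+: l) : pvRep p r l = l := by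
  induction l with
  | nil => simp [pvRep]
  | cons c t ih =>
    rw [pvRep, if_neg (fun hp => h ((List.isPrefixOf_iff_prefix.mp hp).isInfix))]
    rw [ih (fun hi => h (hi.trans (List.suffix_cons c t).isInfix))]

-- ===== stage 1: the 28-fold escape loop is one flatMap =====
def pvF (cs : List Char) (l : List Char) : List Char :=
  cs.foldl (fun t c => pvRep [c] ['\\', c] t) l

theorem pvF_append (cs l1 l2 : List Char) : pvF cs (l1 ++ l2) = pvF cs l1 ++ pvF cs l2 := by
  induction cs generalizing l1 l2 with
  | nil => simp [pvF]
  | cons c cs ih =>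
    rw [pvF, List.foldl_cons]
    have : pvRep [c] ['\\', c] (l1 ++ l2) = pvRep [c] ['\\', c] l1 ++ pvRep [c] ['\\', c] l2 := by
      simp [pvRep_single]
    rw [this]
    exact ih _ _

theorem pvF_nil (cs : List Char) : pvF cs [] = [] := by
  induction cs with
  | nil => rfl
  | cons c cs ih => rw [pvF, List.foldl_cons]; simp only [pvRep]; exact ih

theorem pvF_single_notmem (cs : List Char) (a : Char) (h : a ∉ cs) : pvF cs [a] = [a] := by
  induction cs with
  | nil => rfl
  | cons c cs ih =>
    rw [pvF, List.foldl_cons]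
    have hne : a ≠ c := fun he => h (he ▸ List.mem_cons_self ..)
    have : pvRep [c] ['\\', c] [a] = [a] := by simp [pvRep_single, hne]
    rw [this]
    exact ih (fun hm => h (List.mem_cons_of_mem _ hm))

theorem pvF_single_mem (cs : List Char) (a : Char) (hnd : cs.Nodup) (hb : '\\' ∉ cs)
    (h : a ∈ cs) : pvF cs [a] = ['\\', a] := by
  induction cs with
  | nil => cases h
  | cons c cs ih =>
    rw [pvF, List.foldl_cons]
    by_cases hac : a = c
    · subst hac
      have h1 : pvRep [a] ['\\', a] [a] = ['\\', a] := by simp [pvRep_single]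
      rw [h1]
      show pvF cs ['\\', a] = _
      have : pvF cs ['\\', a] = pvF cs ['\\'] ++ pvF cs [a] := by
        have := pvF_append cs ['\\'] [a]; simpa using this
      rw [this, pvF_single_notmem cs '\\' (fun hm => hb (List.mem_cons_of_mem _ hm)),
        pvF_single_notmem cs a (List.Nodup.notMem hnd)]
      rfl
    · have : pvRep [c] ['\\', c] [a] = [a] := by simp [pvRep_single, hac]
      rw [this]
      show pvF cs [a] = _
      exact ih hnd.of_cons (fun hm => hb (List.mem_cons_of_mem _ hm))
        ((List.mem_cons.mp h).resolve_left hac)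

theorem pvF_flat (cs : List Char) (hnd : cs.Nodup) (hb : '\\' ∉ cs) (l : List Char) :
    pvF cs l = l.flatMap (fun x => if x ∈ cs then ['\\', x] else [x]) := by
  induction l with
  | nil => simp [pvF_nil]
  | cons x l ih =>
    have h2 : pvF cs (x :: l) = pvF cs [x] ++ pvF cs l := by
      have := pvF_append cs [x] l; simpa using this
    rw [h2, ih]
    by_cases hx : x ∈ cs
    · rw [pvF_single_mem cs x hnd hb hx]; simp [hx]
    · rw [pvF_single_notmem cs x hx]; simp [hx]

def pvTail : List Char :=
  ['+', '-', '\'', '"', '^', '.', ',', '!', '*', '_', '~', '`', '/', ';', '?',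
   '<', '>', ']', '[', ':', '@', '#', '$', '%', '&', '(', ')']

theorem stage1 (l : List Char) : pvF pvSpecialChars l = l.flatMap pvEsc := by
  have hsp : pvSpecialChars = '\\' :: pvTail := by decide
  rw [hsp, pvF, List.foldl_cons]
  have h1 : pvTail.foldl (fun t c => pvRep [c] ['\\', c] t) (pvRep ['\\'] ['\\', '\\'] l)
      = pvF pvTail (pvRep ['\\'] ['\\', '\\'] l) := rfl
  rw [h1, pvF_flat pvTail (by decide) (by decide), pvRep_single, List.flatMap_assoc]
  have : (fun x => (if x = '\\' then ['\\', '\\'] else [x]).flatMap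
      (fun y => if y ∈ pvTail then ['\\', y] else [y])) = pvEsc := by
    funext x
    by_cases hx : x = '\\'
    · subst hx; decide
    · have hB : pvSpecialsB = '\\' :: pvTail := by decide
      simp [pvEsc, hB, List.mem_cons, hx]
  rw [this]

-- ===== stage 2: the sequential token replacements are one scan =====

-- generic scanner, tokens only (no brace escaping)
def pvScanT (ts : List (List Char × List Char)) (l : List Char) : List Char :=
  match l with
  | [] => []
  | c :: t =>
    match ts.find? (fun tr => tr.1.isPrefixOf (c :: t)) with
    | some tr => tr.2 ++ pvScanT ts (List.drop (tr.1.length - 1) t)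
    | none => c :: pvScanT ts t
termination_by l.length
decreasing_by
  · simp only [List.length_drop, List.length_cons]; omega
  · simp

-- the well-formedness of a token list that makes the stages commute
def pvGood (ts : List (List Char × List Char)) : Prop :=
  (∀ pr ∈ ts, pr.1.head? = some '{' ∧ '{' ∉ pr.1.tail ∧ pr.2 ≠ [] ∧
     (∀ c ∈ pr.2, c ≠ '{' ∧ c ≠ '}')) ∧
  (∀ pr ∈ ts, ∀ qr ∈ ts, ∀ c ∈ qr.1.tail, c ∉ pr.2) ∧
  List.Pairwise (fun a b => ¬ a.1 <+: b.1 ∧ ¬ b.1 <+: a.1) ts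

theorem pvScanT_nil_ts (l : List Char) : pvScanT [] l = l := by
  induction l with
  | nil => simp [pvScanT]
  | cons c t ih => rw [pvScanT]; simp only [List.find?_nil]; exact congrArg (c :: ·) ih

theorem pvScanT_free (ts : List (List Char × List Char))
    (hts : ∀ pr ∈ ts, pr.1.head? = some '{')
    (u v : List Char) (hu : ∀ c ∈ u, c ≠ '{') :
    pvScanT ts (u ++ v) = u ++ pvScanT ts v := by
  induction u with
  | nil => simp
  | cons c u ih =>
    rw [List.cons_append, pvScanT]
    have hnone : ts.find? (fun tr => tr.1.isPrefixOf (c :: (u ++ v))) = none := by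
      apply List.find?_eq_none.mpr
      intro tr htr
      obtain ⟨d, tl, hd⟩ : ∃ d tl, tr.1 = d :: tl := by
        cases htr1 : tr.1 with
        | nil => exact absurd (hts tr htr) (by rw [htr1]; simp)
        | cons d tl => exact ⟨d, tl, rfl⟩
      have : d = '{' := by have := hts tr htr; rw [hd] at this; simpa using this
      simp only [hd, this, List.isPrefixOf, Bool.not_eq_true, Bool.and_eq_false_iff]
      left
      have := hu c (List.mem_cons_self ..)
      simp [beq_eq_false_iff_ne]
      exact fun he => this he.symm
    rw [hnone]
    exact congrArg (c :: ·) (ih (fun x hx => hu x (List.mem_cons_of_mem _ hx)))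

theorem pvRep_skip (p r : List Char) (u v : List Char)
    (hp : p.head? = some '{') (hu : ∀ c ∈ u, c ≠ '{') :
    pvRep p r (u ++ v) = u ++ pvRep p r v := by
  induction u with
  | nil => simp
  | cons c u ih =>
    rw [List.cons_append, pvRep]
    have hnp : ¬ p.isPrefixOf (c :: (u ++ v)) = true := by
      obtain ⟨d, tl, hd⟩ : ∃ d tl, p = d :: tl := by
        cases hp1 : p with
        | nil => rw [hp1] at hp; simp at hp
        | cons d tl => exact ⟨d, tl, rfl⟩
      have hdc : d = '{' := by rw [hd] at hp; simpa using hp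
      simp only [hd, hdc, List.isPrefixOf, Bool.not_eq_true, Bool.and_eq_false_iff]
      left
      have := hu c (List.mem_cons_self ..)
      simp [beq_eq_false_iff_ne]
      exact fun he => this he.symm
    rw [if_neg hnp]
    exact congrArg (c :: ·) (ih (fun x hx => hu x (List.mem_cons_of_mem _ hx)))

theorem pvRep_transfer (p r : List Char) (hr : r ≠ []) :
    ∀ t q, (∀ c ∈ q, c ∉ r) → q <+: pvRep p r t → q <+: t := by
  intro t
  induction t using pvRep.induct p with
  | case1 =>
    intro q _ h
    simpa [pvRep] using h
  | case2 c t hpre ih =>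
    intro q hq h
    rw [pvRep, if_pos hpre] at h
    cases q with
    | nil => exact List.nil_prefix
    | cons d q' =>
      obtain ⟨e, r', rfl⟩ : ∃ e r', r = e :: r' := by
        cases r with | nil => exact absurd rfl hr | cons e r' => exact ⟨e, r', rfl⟩
      rw [List.cons_append, List.cons_prefix_cons] at h
      exact absurd (h.1 ▸ List.mem_cons_self ..) (hq d (List.mem_cons_self ..))
  | case3 c t hpre ih =>
    intro q hq h
    rw [pvRep, if_neg hpre] at h
    cases q with
    | nil => exact List.nil_prefix
    | cons d q' =>
      rw [List.cons_prefix_cons] at h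
      exact h.1 ▸ List.cons_prefix_cons.mpr ⟨rfl,
        ih q' (fun x hx => hq x (List.mem_cons_of_mem _ hx)) h.2⟩

theorem pvFind_transfer (ts : List (List Char × List Char))
    (hpw : List.Pairwise (fun a b => ¬ a.1 <+: b.1 ∧ ¬ b.1 <+: a.1) ts)
    (q v w : List Char) (qr : List Char × List Char) (hq : qr.1 = q)
    (h : ts.find? (fun tr => tr.1.isPrefixOf (q ++ v)) = some qr) :
    ts.find? (fun tr => tr.1.isPrefixOf (q ++ w)) = some qr := by
  induction ts with
  | nil => simp at h
  | cons a ts ih =>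
    by_cases ha : a.1.isPrefixOf (q ++ v) = true
    · rw [List.find?_cons, ha] at h
      injection h with h; subst h
      have haw : a.1.isPrefixOf (q ++ w) = true := by
        rw [List.isPrefixOf_iff_prefix, hq]; exact List.prefix_append q w
      rw [List.find?_cons, haw]
    · have ha' : a.1.isPrefixOf (q ++ v) = false := Bool.eq_false_iff.mpr ha
      rw [List.find?_cons, ha'] at h
      have hmem : qr ∈ ts := List.mem_of_find?_eq_some h
      have hrel := (List.pairwise_cons.mp hpw).1 qr hmem
      have haw : a.1.isPrefixOf (q ++ w) = false := by
        rw [Bool.eq_false_iff]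
        intro hcon
        rw [List.isPrefixOf_iff_prefix] at hcon
        have hav : ¬ a.1 <+: q ++ v := by
          rw [← List.isPrefixOf_iff_prefix]; simp [ha']
        rcases List.prefix_or_prefix_of_prefix hcon (List.prefix_append q w) with h1 | h1
        · exact hav (h1.trans (hq ▸ List.prefix_append q v))
        · exact hrel.2 (hq ▸ h1)
      rw [List.find?_cons, haw]
      exact ih (List.pairwise_cons.mp hpw).2 h

theorem pvScanT_cons_some (ts : List (List Char × List Char)) (c : Char) (t : List Char)
    (tr : List Char × List Char)
    (hf : ts.find? (fun tr => tr.1.isPrefixOf (c :: t)) = some tr) :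
    pvScanT ts (c :: t) = tr.2 ++ pvScanT ts (List.drop (tr.1.length - 1) t) := by
  rw [pvScanT, hf]

theorem pvScanT_cons_none (ts : List (List Char × List Char)) (c : Char) (t : List Char)
    (hf : ts.find? (fun tr => tr.1.isPrefixOf (c :: t)) = none) :
    pvScanT ts (c :: t) = c :: pvScanT ts t := by
  rw [pvScanT, hf]

theorem pvGood_tail (a : List Char × List Char) (ts : List (List Char × List Char))
    (h : pvGood (a :: ts)) : pvGood ts :=
  ⟨fun pr hm => h.1 pr (List.mem_cons_of_mem _ hm),
   fun pr hm qr hm' => h.2.1 pr (List.mem_cons_of_mem _ hm) qr (List.mem_cons_of_mem _ hm'),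
   (List.pairwise_cons.mp h.2.2).2⟩

theorem pvStep (p r : List Char) (ts' : List (List Char × List Char))
    (hg : pvGood ((p, r) :: ts')) (l : List Char) :
    pvScanT ts' (pvRep p r l) = pvScanT ((p, r) :: ts') l := by
  obtain ⟨hg1, hg2, hg3⟩ := hg
  have hpr := hg1 (p, r) (List.mem_cons_self ..)
  have hphead : p.head? = some '{' := hpr.1
  have hrne : r ≠ [] := hpr.2.2.1
  have hrch : ∀ c ∈ r, c ≠ '{' := fun c hc => (hpr.2.2.2 c hc).1
  have hts' : ∀ pr ∈ ts', pr.1.head? = some '{' :=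
    fun pr h => (hg1 pr (List.mem_cons_of_mem _ h)).1
  have hpw' := (List.pairwise_cons.mp hg3).2
  have main : ∀ n (l : List Char), l.length ≤ n →
      pvScanT ts' (pvRep p r l) = pvScanT ((p, r) :: ts') l := by
    intro n
    induction n with
    | zero =>
      intro l hl
      have : l = [] := by cases l <;> simp_all
      subst this; simp [pvRep, pvScanT]
    | succ n ih =>
      intro l hl
      cases l with
      | nil => simp [pvRep, pvScanT]
      | cons c t =>
        by_cases hpre : p.isPrefixOf (c :: t) = true
        · -- the head token matches here
          rw [pvRep, if_pos hpre]
          rw [pvScanT_free ts' hts' r _ hrch]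
          rw [ih _ (by simp only [List.length_drop, List.length_cons] at hl ⊢; omega)]
          have hfind : ((p, r) :: ts').find? (fun tr => tr.1.isPrefixOf (c :: t))
              = some (p, r) := by
            rw [List.find?_cons]; simp [hpre]
          rw [pvScanT_cons_some _ c t _ hfind]
        · rcases hf : ts'.find? (fun tr => tr.1.isPrefixOf (c :: t)) with _ | qr
          · -- no token matches here
            rw [pvRep, if_neg hpre]
            have hnone2 : ts'.find? (fun tr => tr.1.isPrefixOf (c :: pvRep p r t)) = none := by
              apply List.find?_eq_none.mpr
              intro tr htr hmatch
              obtain ⟨d, tl, hd⟩ : ∃ d tl, tr.1 = d :: tl := by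
                cases htr1 : tr.1 with
                | nil => exact absurd (hts' tr htr) (by rw [htr1]; simp)
                | cons d tl => exact ⟨d, tl, rfl⟩
              rw [List.isPrefixOf_iff_prefix, hd, List.cons_prefix_cons] at hmatch
              have htl : tl <+: t := by
                apply pvRep_transfer p r hrne t tl _ hmatch.2
                intro x hx
                have := hg2 (p, r) (List.mem_cons_self ..) tr (List.mem_cons_of_mem _ htr) x
                rw [hd] at this
                exact this hx
              have : tr.1.isPrefixOf (c :: t) = true := by
                rw [List.isPrefixOf_iff_prefix, hd, hmatch.1]
                exact List.cons_prefix_cons.mpr ⟨rfl, htl⟩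
              have hno := List.find?_eq_none.mp hf tr htr
              simp [this] at hno
            rw [pvScanT_cons_none _ _ _ hnone2]
            rw [ih t (by simpa using Nat.le_of_succ_le_succ (by simpa using hl))]
            have hfull : ((p, r) :: ts').find? (fun tr => tr.1.isPrefixOf (c :: t)) = none := by
              rw [List.find?_cons]
              simp only [hpre]
              simpa using hf
            rw [pvScanT_cons_none _ _ _ hfull]
          · -- a later token matches here
            have hqpre : qr.1 <+: c :: t := by
              have := List.find?_some hf
              simpa [List.isPrefixOf_iff_prefix] using this
            obtain ⟨v, hv⟩ := hqpre
            obtain ⟨qt, hqt⟩ : ∃ qt, qr.1 = '{' :: qt := by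
              have hh := hts' qr (List.mem_of_find?_eq_some hf)
              cases hq1 : qr.1 with
              | nil => rw [hq1] at hh; simp at hh
              | cons d tl =>
                rw [hq1] at hh; simp at hh
                exact ⟨tl, by rw [hh]⟩
            have hqtok : '{' ∉ qt := by
              have := (hg1 qr (List.mem_cons_of_mem _ (List.mem_of_find?_eq_some hf))).2.1
              rwa [hqt] at this
            rw [hqt] at hv
            have hc : c = '{' := by
              rw [List.cons_append] at hv
              exact (List.cons.injEq .. ▸ hv).1.symm
            have ht : qt ++ v = t := by
              rw [List.cons_append] at hv
              exact (List.cons.injEq .. ▸ hv).2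
            subst hc
            have hrepl : pvRep p r ('{' :: t) = '{' :: (qt ++ pvRep p r v) := by
              rw [pvRep, if_neg hpre, ← ht, pvRep_skip p r qt v hphead (fun x hx h => hqtok (h ▸ hx))]
            rw [hrepl]
            have hfv : ts'.find? (fun tr => tr.1.isPrefixOf (('{' :: qt) ++ v)) = some qr := by
              rw [List.cons_append, ht]; exact hf
            have hfw := pvFind_transfer ts' hpw' ('{' :: qt) v (pvRep p r v) qr hqt hfv
            rw [List.cons_append] at hfw
            rw [pvScanT_cons_some _ _ _ _ hfw, hqt]
            simp only [List.length_cons, Nat.add_sub_cancel]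
            rw [List.drop_left]
            have hvlen : v.length ≤ n := by
              have h1 : ('{' :: t).length ≤ n + 1 := hl
              simp only [List.length_cons] at h1
              have h2 := congrArg List.length ht
              simp at h2
              omega
            rw [ih v hvlen]
            have hfull : ((p, r) :: ts').find? (fun tr => tr.1.isPrefixOf ('{' :: t)) = some qr := by
              rw [List.find?_cons]
              simp only [hpre]
              simpa using hf
            rw [pvScanT_cons_some _ _ _ _ hfull, hqt]
            simp only [List.length_cons, Nat.add_sub_cancel]
            rw [← ht, List.drop_left]
  exact main l.length l le_rfl

theorem pvFold_scan (ts : List (List Char × List Char)) (hg : pvGood ts) (l : List Char) :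
    ts.foldl (fun t pr => pvRep pr.1 pr.2 t) l = pvScanT ts l := by
  induction ts generalizing l with
  | nil => simp [pvScanT_nil_ts]
  | cons a ts ih =>
    rw [List.foldl_cons, ih (pvGood_tail a ts hg)]
    exact pvStep a.1 a.2 ts hg l

-- ===== stage 3: brace escaping merges into the scan =====
def pvEscB (c : Char) : List Char := if c = '{' ∨ c = '}' then ['\\', c] else [c]

theorem pvScan_cons_some (c : Char) (t : List Char) (tr : List Char × List Char)
    (hf : pvTokens.find? (fun tr => tr.1.isPrefixOf (c :: t)) = some tr) :
    pvScan (c :: t) = tr.2 ++ pvScan (List.drop (tr.1.length - 1) t) := by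
  rw [pvScan, hf]

theorem pvScan_cons_none (c : Char) (t : List Char)
    (hf : pvTokens.find? (fun tr => tr.1.isPrefixOf (c :: t)) = none) :
    pvScan (c :: t) = (if c = '{' ∨ c = '}' then ['\\', c] else [c]) ++ pvScan t := by
  rw [pvScan, hf]

theorem flatMap_id_of (u : List Char) (f : Char → List Char) (h : ∀ c ∈ u, f c = [c]) :
    u.flatMap f = u := by
  induction u with
  | nil => rfl
  | cons c u ih =>
    rw [List.flatMap_cons, h c (List.mem_cons_self ..), ih (fun x hx => h x (List.mem_cons_of_mem _ hx))]
    rfl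

theorem stage3 (l : List Char) : (pvScanT pvTokens l).flatMap pvEscB = pvScan l := by
  have main : ∀ n (l : List Char), l.length ≤ n →
      (pvScanT pvTokens l).flatMap pvEscB = pvScan l := by
    intro n
    induction n with
    | zero =>
      intro l hl
      have : l = [] := by cases l <;> simp_all
      subst this; simp [pvScanT, pvScan]
    | succ n ih =>
      intro l hl
      cases l with
      | nil => simp [pvScanT, pvScan]
      | cons c t =>
        rcases hf : pvTokens.find? (fun tr => tr.1.isPrefixOf (c :: t)) with _ | tr
        · rw [pvScanT_cons_none _ _ _ hf, pvScan_cons_none _ _ hf]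
          rw [List.flatMap_cons, ih t (by simpa using Nat.le_of_succ_le_succ (by simpa using hl))]
          rfl
        · rw [pvScanT_cons_some _ _ _ _ hf, pvScan_cons_some _ _ _ hf]
          rw [List.flatMap_append]
          rw [flatMap_id_of tr.2 pvEscB (by
            have hm : tr ∈ pvTokens := List.mem_of_find?_eq_some hf
            have : ∀ tr ∈ pvTokens, ∀ c ∈ tr.2, pvEscB c = [c] := by simp [pvTokens, pvEscB]
            exact this tr hm)]
          rw [ih _ (by simp only [List.length_drop, List.length_cons] at hl ⊢; omega)]
  exact main l.length l le_rfl

-- ===== assembly =====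
theorem fold1_eq (cs : List Char) (l : List Char) :
    cs.foldl (fun t sc => PySem.Chars.replace t [sc] ('\\' :: [sc])) l = pvF cs l := by
  induction cs generalizing l with
  | nil => rfl
  | cons c cs ih =>
    rw [pvF, List.foldl_cons, List.foldl_cons, replace_eq_pvRep l [c] _ (by simp), ih]
    rfl

theorem fold2_eq (fs : List (List Char × List Char)) (l : List Char) :
    fs.foldl (fun t f =>
        let cf := '{' :: f.1 ++ ['}']
        if PySem.Chars.isIn cf t then PySem.Chars.replace t cf f.2 else t) l
      = (fs.map (fun f => ('{' :: f.1 ++ ['}'], f.2))).foldl (fun t pr => pvRep pr.1 pr.2 t) l := by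
  induction fs generalizing l with
  | nil => rfl
  | cons f fs ih =>
    rw [List.foldl_cons, List.map_cons, List.foldl_cons, ← ih]
    congr 1
    by_cases hin : PySem.Chars.isIn ('{' :: f.1 ++ ['}']) l = true
    · simp only [hin, if_true]
      exact replace_eq_pvRep l _ _ (by simp)
    · simp only [Bool.not_eq_true] at hin
      simp only [hin, Bool.false_eq_true, if_false]
      rw [pvRep_of_not_infix _ _ _ (((PySem.Chars.isIn_eq_false_iff _ _).mp hin))]

theorem braces_eq (l : List Char) :
    pvRep ['}'] ['\\', '}'] (pvRep ['{'] ['\\', '{'] l) = l.flatMap pvEscB := by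
  rw [pvRep_single, pvRep_single, List.flatMap_assoc]
  congr 1
  funext x
  by_cases h1 : x = '{'
  · subst h1; simp [pvEscB]
  · by_cases h2 : x = '}'
    · subst h2; simp [pvEscB]
    · simp [pvEscB, h1, h2]

theorem pvGood_pvTokens : pvGood pvTokens := by
  refine ⟨by simp [pvTokens], by simp [pvTokens], by simp [pvTokens, List.cons_prefix_cons]⟩

-- ===== VERDICT (by name: the statement is the Claim_ definition above) =====
theorem text_formatter_spec : Claim_equal_text_formatter := by
  intro text _
  show text_formatter text = text_formatter_alt text
  simp only [text_formatter, text_formatter_alt]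
  refine congrArg String.ofList ?_
  rw [fold1_eq, stage1, fold2_eq]
  have hmap : pvFormatter.map (fun f => ('{' :: f.1 ++ ['}'], f.2)) = pvTokens := by decide
  rw [hmap, pvFold_scan pvTokens pvGood_pvTokens,
    replace_eq_pvRep _ ['{'] _ (by simp), replace_eq_pvRep _ ['}'] _ (by simp),
    braces_eq, stage3]
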